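-- pv_equiv track=rewrite | github.com/abby-mi11er/edith-m2 | electron/extraResources/edith_backend/server/citadel_connectome_master.py | _morning_greeting
-- ===== SOURCE A (Python) =====
-- def _morning_greeting(checks: list) -> str:
--     """Generate the Winnie morning greeting."""
--     online = sum(1 for _, status in checks if status not in ("offline", "DISCONNECTED", "module offline"))
--     total = len(checks)
--
--     greeting = f"Good morning. {online}/{total} systems online.\n\n"
--
--     # Mention new papers
--     for name, status in checks:
--         if name == "Forensic Ingestion" and "new papers" in status:
--             count = status.split()[0]
--             if count != "0":
--                 greeting += f"📋 I found {count} new papers to audit.\n"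
--
--     # Mention dream results
--     for name, status in checks:
--         if name == "Dream Engine" and "bridges" in status:
--             count = status.split()[0]
--             if count != "0":
--                 greeting += f"🌉 I found {count} hidden bridges while you slept.\n"
--
--     # Mention weak claims
--     for name, status in checks:
--         if name == "Truth Maintenance" and "weak" in status:
--             greeting += f"⚠️ {status} — review before your committee meeting.\n"
--
--     greeting += "\nShall we ignite the Cockpit?"
--     return greeting
-- ===== SOURCE B (Python) =====
-- def _morning_greeting(checks: list) -> str:
--     """Generate the Winnie morning greeting (single pass over checks)."""
--     online = 0
--     papers = ""
--     bridges = ""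
--     weak = ""
--     for name, status in checks:
--         if status not in ("offline", "DISCONNECTED", "module offline"):
--             online += 1
--         if name == "Forensic Ingestion" and "new papers" in status:
--             count = status.split()[0]
--             if count != "0":
--                 papers += f"📋 I found {count} new papers to audit.\n"
--         if name == "Dream Engine" and "bridges" in status:
--             count = status.split()[0]
--             if count != "0":
--                 bridges += f"🌉 I found {count} hidden bridges while you slept.\n"
--         if name == "Truth Maintenance" and "weak" in status:
--             weak += f"⚠️ {status} — review before your committee meeting.\n"
--     return (f"Good morning. {online}/{len(checks)} systems online.\n\n"
--             + papers + bridges + weak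
--             + "\nShall we ignite the Cockpit?")
-- ===== Notes on version B (the rewrite author's own statement) =====
-- stated objective: alternative
-- what changed: A scans the checks list four times (one generator sum plus three section loops appending to one growing string); B makes a single pass that counts online systems and routes each matching entry into one of three section buffers, assembling the greeting once at the end.
import Mathlib
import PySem

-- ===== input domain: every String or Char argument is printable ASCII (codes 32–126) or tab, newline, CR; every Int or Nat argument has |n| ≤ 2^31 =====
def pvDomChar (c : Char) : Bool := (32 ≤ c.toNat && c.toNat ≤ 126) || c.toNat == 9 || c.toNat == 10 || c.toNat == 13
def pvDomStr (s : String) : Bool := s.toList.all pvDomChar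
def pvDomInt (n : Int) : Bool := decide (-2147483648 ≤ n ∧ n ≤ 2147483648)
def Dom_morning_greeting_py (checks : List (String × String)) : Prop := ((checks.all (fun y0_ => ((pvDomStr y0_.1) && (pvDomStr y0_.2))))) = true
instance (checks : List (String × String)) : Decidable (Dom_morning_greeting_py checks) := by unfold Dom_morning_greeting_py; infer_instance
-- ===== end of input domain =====

-- B builds the greeting in a single pass over `checks` (counting online systems and routing matching
-- entries into three section buffers) instead of A's four separate scans; proved equal on all inputs.


-- ===== PORT A =====
-- Python str.split() whitespace (exact on the ASCII domain: ' ', \t, \n, \r, \v, \f)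
def pvIsWs (c : Char) : Bool := c = ' ' || c = '\t' || c = '\n' || c = '\r' || c.toNat == 11 || c.toNat == 12
-- status.split()[0]; Python raises IndexError only on all-whitespace strings, which the guards
-- ("new papers"/"bridges" is a substring of status) make unreachable, so the "" default is never used.
def pvFirstWord (s : String) : String :=
  String.ofList ((s.toList.dropWhile pvIsWs).takeWhile (fun c => !pvIsWs c))

def morning_greeting_py (checks : List (String × String)) : String :=
  let online : Int := checks.foldl
    (fun acc p => if p.2 = "offline" ∨ p.2 = "DISCONNECTED" ∨ p.2 = "module offline" then acc else acc + 1) 0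
  let total : Int := PySem.List.len checks
  let greeting := "Good morning. " ++ PySem.Int.toStr online ++ "/" ++ PySem.Int.toStr total ++ " systems online.\n\n"
  let greeting := checks.foldl (fun g p =>
    if p.1 = "Forensic Ingestion" ∧ PySem.Str.isIn "new papers" p.2 = true then
      let count := pvFirstWord p.2
      if count ≠ "0" then g ++ ("📋 I found " ++ count ++ " new papers to audit.\n") else g
    else g) greeting
  let greeting := checks.foldl (fun g p =>
    if p.1 = "Dream Engine" ∧ PySem.Str.isIn "bridges" p.2 = true then
      let count := pvFirstWord p.2
      if count ≠ "0" then g ++ ("🌉 I found " ++ count ++ " hidden bridges while you slept.\n") else g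
    else g) greeting
  let greeting := checks.foldl (fun g p =>
    if p.1 = "Truth Maintenance" ∧ PySem.Str.isIn "weak" p.2 = true then
      g ++ ("⚠️ " ++ p.2 ++ " — review before your committee meeting.\n")
    else g) greeting
  greeting ++ "\nShall we ignite the Cockpit?"

-- ===== PORT B =====
def morning_greeting_py_alt (checks : List (String × String)) : String :=
  let st := checks.foldl (fun (st : Int × String × String × String) p =>
    let online := if p.2 = "offline" ∨ p.2 = "DISCONNECTED" ∨ p.2 = "module offline" then st.1 else st.1 + 1
    let papers := if p.1 = "Forensic Ingestion" ∧ PySem.Str.isIn "new papers" p.2 = true then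
        (let count := pvFirstWord p.2
         if count ≠ "0" then st.2.1 ++ ("📋 I found " ++ count ++ " new papers to audit.\n") else st.2.1)
      else st.2.1
    let bridges := if p.1 = "Dream Engine" ∧ PySem.Str.isIn "bridges" p.2 = true then
        (let count := pvFirstWord p.2
         if count ≠ "0" then st.2.2.1 ++ ("🌉 I found " ++ count ++ " hidden bridges while you slept.\n") else st.2.2.1)
      else st.2.2.1
    let weak := if p.1 = "Truth Maintenance" ∧ PySem.Str.isIn "weak" p.2 = true then
        st.2.2.2 ++ ("⚠️ " ++ p.2 ++ " — review before your committee meeting.\n")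
      else st.2.2.2
    (online, papers, bridges, weak)) ((0 : Int), "", "", "")
  "Good morning. " ++ PySem.Int.toStr st.1 ++ "/" ++ PySem.Int.toStr (PySem.List.len checks) ++ " systems online.\n\n"
    ++ st.2.1 ++ st.2.2.1 ++ st.2.2.2
    ++ "\nShall we ignite the Cockpit?"

-- ===== PRECONDITION & SPEC =====
def Spec_morning_greeting_py (checks : List (String × String)) (out : String) : Prop := out = morning_greeting_py_alt checks
instance (checks : List (String × String)) (out : String) : Decidable (Spec_morning_greeting_py checks out) := by unfold Spec_morning_greeting_py; infer_instance

-- ===== CLAIM (what is proved, stated in full; the proofs are below) =====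
def Claim_equal_morning_greeting_py : Prop := ∀ (checks : List (String × String)), Dom_morning_greeting_py checks → Spec_morning_greeting_py checks (morning_greeting_py checks)

-- ===== LEMMAS AND PROOFS =====

-- per-entry contribution of each section, as a string ("" when the entry does not match)
def pvFP (p : String × String) : String :=
  if p.1 = "Forensic Ingestion" ∧ PySem.Str.isIn "new papers" p.2 = true ∧ pvFirstWord p.2 ≠ "0" then
    "📋 I found " ++ pvFirstWord p.2 ++ " new papers to audit.\n" else ""
def pvFB (p : String × String) : String :=
  if p.1 = "Dream Engine" ∧ PySem.Str.isIn "bridges" p.2 = true ∧ pvFirstWord p.2 ≠ "0" then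
    "🌉 I found " ++ pvFirstWord p.2 ++ " hidden bridges while you slept.\n" else ""
def pvFW (p : String × String) : String :=
  if p.1 = "Truth Maintenance" ∧ PySem.Str.isIn "weak" p.2 = true then
    "⚠️ " ++ p.2 ++ " — review before your committee meeting.\n" else ""

def pvCat {α : Type} (f : α → String) : List α → String
  | [] => ""
  | x :: xs => f x ++ pvCat f xs

-- a fold that appends f x at each step prepends its start to pvCat f
theorem pv_foldl_append {α : Type} (step : String → α → String) (f : α → String)
    (h : ∀ g x, step g x = g ++ f x) :
    ∀ (xs : List α) (g : String), xs.foldl step g = g ++ pvCat f xs := by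
  intro xs
  induction xs with
  | nil => intro g; simp [pvCat]
  | cons x xs ih => intro g; simp [List.foldl, h, pvCat, ih, String.append_assoc]

theorem pv_stepP (g : String) (p : String × String) :
    (if p.1 = "Forensic Ingestion" ∧ PySem.Str.isIn "new papers" p.2 = true then
      (let count := pvFirstWord p.2
       if count ≠ "0" then g ++ ("📋 I found " ++ count ++ " new papers to audit.\n") else g)
     else g) = g ++ pvFP p := by
  simp only [pvFP]
  split_ifs with h1 h2 h3 <;> simp_all
theorem pv_stepB (g : String) (p : String × String) :
    (if p.1 = "Dream Engine" ∧ PySem.Str.isIn "bridges" p.2 = true then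
      (let count := pvFirstWord p.2
       if count ≠ "0" then g ++ ("🌉 I found " ++ count ++ " hidden bridges while you slept.\n") else g)
     else g) = g ++ pvFB p := by
  simp only [pvFB]
  split_ifs with h1 h2 h3 <;> simp_all
theorem pv_stepW (g : String) (p : String × String) :
    (if p.1 = "Truth Maintenance" ∧ PySem.Str.isIn "weak" p.2 = true then
      g ++ ("⚠️ " ++ p.2 ++ " — review before your committee meeting.\n")
     else g) = g ++ pvFW p := by
  simp only [pvFW]
  split_ifs with h1 <;> simp_all

-- the online-count step shared (syntactically) by both ports
def pvStepN (acc : Int) (p : String × String) : Int :=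
  if p.2 = "offline" ∨ p.2 = "DISCONNECTED" ∨ p.2 = "module offline" then acc else acc + 1

-- B's single fold computes the count and the three concatenated section buffers
theorem pv_bfold (xs : List (String × String)) :
    ∀ (n : Int) (pp bb ww : String),
    xs.foldl (fun (st : Int × String × String × String) p =>
      let online := if p.2 = "offline" ∨ p.2 = "DISCONNECTED" ∨ p.2 = "module offline" then st.1 else st.1 + 1
      let papers := if p.1 = "Forensic Ingestion" ∧ PySem.Str.isIn "new papers" p.2 = true then
          (let count := pvFirstWord p.2
           if count ≠ "0" then st.2.1 ++ ("📋 I found " ++ count ++ " new papers to audit.\n") else st.2.1)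
        else st.2.1
      let bridges := if p.1 = "Dream Engine" ∧ PySem.Str.isIn "bridges" p.2 = true then
          (let count := pvFirstWord p.2
           if count ≠ "0" then st.2.2.1 ++ ("🌉 I found " ++ count ++ " hidden bridges while you slept.\n") else st.2.2.1)
        else st.2.2.1
      let weak := if p.1 = "Truth Maintenance" ∧ PySem.Str.isIn "weak" p.2 = true then
          st.2.2.2 ++ ("⚠️ " ++ p.2 ++ " — review before your committee meeting.\n")
        else st.2.2.2
      (online, papers, bridges, weak)) (n, pp, bb, ww)
    = (xs.foldl pvStepN n, pp ++ pvCat pvFP xs, bb ++ pvCat pvFB xs, ww ++ pvCat pvFW xs) := by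
  induction xs with
  | nil => intro n pp bb ww; simp [pvCat]
  | cons x xs ih =>
    intro n pp bb ww
    simp only [List.foldl, ih, pvCat, pvStepN]
    rw [pv_stepP pp x, pv_stepB bb x, pv_stepW ww x]
    simp [String.append_assoc]

-- ===== VERDICT (by name: the statement is the Claim_ definition above) =====
theorem morning_greeting_py_spec : Claim_equal_morning_greeting_py := by
  intro checks _
  unfold Spec_morning_greeting_py morning_greeting_py morning_greeting_py_alt
  simp only [pv_bfold, pv_foldl_append _ pvFP pv_stepP, pv_foldl_append _ pvFB pv_stepB,
    pv_foldl_append _ pvFW pv_stepW]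
  simp [String.append_assoc]
  rfl
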